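-- pv_equiv track=rewrite | github.com/REDDITARUN/arc-react | scripts/prepare_data.py | dihedral_transform
-- ===== SOURCE A (Python) =====
-- def dihedral_transform(grid: list, tid: int) -> list:
--     if tid == 0:
--         return [row[:] for row in grid]
--     if tid == 1:
--         return [list(row) for row in zip(*grid[::-1])]
--     if tid == 2:
--         return [row[::-1] for row in grid[::-1]]
--     if tid == 3:
--         return [list(row) for row in zip(*grid)][::-1]
--     if tid == 4:
--         return [row[::-1] for row in grid]
--     if tid == 5:
--         return grid[::-1]
--     if tid == 6:
--         return [list(row) for row in zip(*grid)]
--     if tid == 7: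
--         return [row[::-1] for row in [list(row) for row in zip(*grid)]][::-1]
--     raise ValueError(f"Unsupported dihedral transform id: {tid}")
-- ===== SOURCE B (Python) =====
-- _DIHEDRAL_FLAGS = {
--     0: (False, False, False),
--     4: (False, False, True),
--     5: (False, True, False),
--     2: (False, True, True),
--     6: (True, False, False),
--     1: (True, False, True),
--     3: (True, True, False),
--     7: (True, True, True),
-- }
--
--
-- def dihedral_transform(grid: list, tid: int) -> list:
--     try:
--         use_transpose, reverse_rows, reverse_cols = _DIHEDRAL_FLAGS[tid]
--     except KeyError:
--         raise ValueError(f"Unsupported dihedral transform id: {tid}")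
--     base = [list(r) for r in zip(*grid)] if use_transpose else [list(r) for r in grid]
--     if reverse_rows:
--         base = base[::-1]
--     if reverse_cols:
--         base = [r[::-1] for r in base]
--     return base
-- ===== Notes on version B (the rewrite author's own statement) =====
-- stated objective: simpler
-- what changed: Replaces the eight independent literal grid constructions with a single flip-and-transpose routine: tid is decoded once into three booleans (transpose, reverse-rows, reverse-cols) via a table, and one general pipeline applies them; equivalence is about the return value only (A's tid 5 aliases the caller's row objects, B copies them).
import Mathlib
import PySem

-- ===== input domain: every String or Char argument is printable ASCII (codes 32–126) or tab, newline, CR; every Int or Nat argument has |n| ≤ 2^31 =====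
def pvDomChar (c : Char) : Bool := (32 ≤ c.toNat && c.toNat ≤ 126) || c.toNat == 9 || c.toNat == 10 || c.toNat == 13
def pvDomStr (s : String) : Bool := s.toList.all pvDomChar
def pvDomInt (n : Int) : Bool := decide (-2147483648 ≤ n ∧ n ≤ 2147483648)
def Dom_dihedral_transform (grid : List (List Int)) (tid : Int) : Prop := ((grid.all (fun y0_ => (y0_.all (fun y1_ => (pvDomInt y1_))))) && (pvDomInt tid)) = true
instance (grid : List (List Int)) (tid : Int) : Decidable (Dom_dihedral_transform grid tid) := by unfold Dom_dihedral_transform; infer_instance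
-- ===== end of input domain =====

-- B decodes tid once into (transpose, reverse-rows, reverse-cols) flags and runs one generic
-- flip/transpose pipeline instead of A's eight literal constructions; return-value equivalence only
-- (A's tid 5 aliases the caller's row objects, B copies them).


-- ===== PORT A =====
-- Python's zip(*g): take heads of all rows while every row is nonempty (truncates a jagged
-- grid to its shortest row, returns [] when g is empty).  Exact on every input; used by both
-- ports because both Pythons call the built-in zip.
def pyZipStar (g : List (List Int)) : List (List Int) :=
  if h : g ≠ [] ∧ g.all (fun r => !r.isEmpty) then
    (g.map (fun r => r.headD 0)) :: pyZipStar (g.map List.tail)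
  else []
termination_by (g.headD []).length
decreasing_by
  obtain ⟨h1, h2⟩ := h
  cases g with
  | nil => simp at h1
  | cons a t =>
    simp only [List.all_cons, Bool.and_eq_true, Bool.not_eq_true', List.isEmpty_eq_false_iff] at h2
    cases a with
    | nil => exact absurd rfl h2.1
    | cons x xs => simp

-- literal transliteration of A: one branch per tid, each building its literal result
-- ([::-1] = List.reverse, row[:] / list(row) = the row's value).  The final 'raise ValueError'
-- branch is outside Pre_; the port returns [] there.
def dihedral_transform (grid : List (List Int)) (tid : Int) : List (List Int) :=
  if tid = 0 then grid.map (fun r => r)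
  else if tid = 1 then pyZipStar grid.reverse
  else if tid = 2 then (grid.reverse).map List.reverse
  else if tid = 3 then (pyZipStar grid).reverse
  else if tid = 4 then grid.map List.reverse
  else if tid = 5 then grid.reverse
  else if tid = 6 then pyZipStar grid
  else if tid = 7 then ((pyZipStar grid).map List.reverse).reverse
  else []  -- Python raises ValueError here; excluded by Pre_

-- ===== PORT B =====
-- Source B's _DIHEDRAL_FLAGS table: tid ↦ (use_transpose, reverse_rows, reverse_cols)
def dihedralFlags : List (Int × (Bool × Bool × Bool)) :=
  [(0, (false, false, false)), (4, (false, false, true)),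
   (5, (false, true,  false)), (2, (false, true,  true)),
   (6, (true,  false, false)), (1, (true,  false, true)),
   (3, (true,  true,  false)), (7, (true,  true,  true))]

-- literal transliteration of B: decode tid via the table, build the base grid (transpose or
-- row copy), then apply the two optional reversals.  KeyError → ValueError is outside Pre_.
def dihedral_transform_alt (grid : List (List Int)) (tid : Int) : List (List Int) :=
  match dihedralFlags.lookup tid with
  | none => []  -- Python raises ValueError here; excluded by Pre_
  | some (useT, revRows, revCols) =>
    let base := if useT then pyZipStar grid else grid.map (fun r => r)
    let base := if revRows then base.reverse else base
    if revCols then base.map List.reverse else base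

-- ===== PRECONDITION & SPEC =====
-- Pre_ excludes exactly the tids on which Python A raises ValueError (anything outside 0..7).
def Pre_dihedral_transform (grid : List (List Int)) (tid : Int) : Prop := 0 ≤ tid ∧ tid < 8
instance (grid : List (List Int)) (tid : Int) : Decidable (Pre_dihedral_transform grid tid) := by
  unfold Pre_dihedral_transform; infer_instance

def pvWitness_dihedral_transform : List (List Int) × Int := ([[1, 2], [3, 4]], 3)

def Spec_dihedral_transform (grid : List (List Int)) (tid : Int) (out : List (List Int)) : Prop := out = dihedral_transform_alt grid tid
instance (grid : List (List Int)) (tid : Int) (out : List (List Int)) : Decidable (Spec_dihedral_transform grid tid out) := by unfold Spec_dihedral_transform; infer_instance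

-- ===== CLAIM (what is proved, stated in full; the proofs are below) =====
def Claim_equal_dihedral_transform : Prop := ∀ (grid : List (List Int)) (tid : Int), Dom_dihedral_transform grid tid → Pre_dihedral_transform grid tid → Spec_dihedral_transform grid tid (dihedral_transform grid tid)

-- ===== LEMMAS AND PROOFS =====

-- transposing a vertically flipped grid = transposing then reversing each row
theorem pyZipStar_reverse (g : List (List Int)) :
    pyZipStar g.reverse = (pyZipStar g).map List.reverse := by
  by_cases hg : g ≠ [] ∧ g.all (fun r => !r.isEmpty)
  · have hc : g.reverse ≠ [] ∧ g.reverse.all (fun r => !r.isEmpty) := by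
      simpa using hg
    conv_lhs => rw [pyZipStar]
    rw [dif_pos hc]
    conv_rhs => rw [pyZipStar]
    rw [dif_pos hg]
    simp only [List.map_cons, List.map_reverse, List.cons.injEq, true_and]
    exact pyZipStar_reverse (g.map List.tail)
  · have hc : ¬(g.reverse ≠ [] ∧ g.reverse.all (fun r => !r.isEmpty)) := by
      simpa using hg
    conv_lhs => rw [pyZipStar]
    rw [dif_neg hc]
    conv_rhs => rw [pyZipStar]
    rw [dif_neg hg]
    simp
termination_by (g.headD []).length
decreasing_by
  obtain ⟨h1, h2⟩ := hg
  cases g with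
  | nil => simp at h1
  | cons a t =>
    simp only [List.all_cons, Bool.and_eq_true, Bool.not_eq_true', List.isEmpty_eq_false_iff] at h2
    cases a with
    | nil => exact absurd rfl h2.1
    | cons x xs => simp

theorem dihedral_transform_spec : Claim_equal_dihedral_transform := by
  intro grid tid _ hpre
  obtain ⟨h0, h8⟩ := hpre
  unfold Spec_dihedral_transform dihedral_transform dihedral_transform_alt dihedralFlags
  interval_cases tid
  · simp [List.lookup]
  · simp [List.lookup, pyZipStar_reverse]
  · simp [List.lookup]
  · simp [List.lookup]
  · simp [List.lookup]
  · simp [List.lookup]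
  · simp [List.lookup]
  · simp [List.lookup, List.map_reverse]
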